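-- pv_equiv track=rewrite | github.com/Kdelphinus/Python_study | Baekjoon/27. 동적 계획법과 최단거리 역추적/05. 경찰차.py | build_shortest_dp
-- ===== SOURCE A (Python) =====
-- def get_dist(i, j, accidents):
--     x1, y1 = accidents[i]
--     x2, y2 = accidents[j]
--     return abs(x1 - x2) + abs(y1 - y2)
--
-- def build_shortest_dp(accidents, accident_num):
--     dp = [[-1] * accident_num for _ in range(accident_num)]
--     cars = [[-1] * accident_num for _ in range(accident_num)]
--
--     for start in range(len(dp)):
--         dp[start][-1] = 0
--     for last in range(len(dp[0]) - 2, -1, -1):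
--         for start in range(last):
--             # 현재 위치에서 직전 사건으로 가는 거리 + 직전 사건에서 현재 사건으로 가는 거리
--             from_start = get_dist(start, last + 1, accidents) + dp[last][last + 1]
--
--             # 현재 위치에서 현재 사건으로 가는 거리 + 현재 사건에서 직전 사건으로 가는 거리
--             from_j = get_dist(last, last + 1, accidents) + dp[start][last + 1]
--
--             if from_start < from_j:
--                 dp[start][last] = from_start
--                 cars[start][last] = start
--             else:
--                 dp[start][last] = from_j
--                 cars[start][last] = last
--
--     return dp, cars
-- ===== SOURCE B (Python) =====
-- def build_shortest_dp(accidents, accident_num):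
--     # Top-down memoized recursion over the recurrence instead of an iterative
--     # right-to-left table fill; the driver visits the same upper-triangle cells.
--     n = accident_num
--     dp = [[-1] * n for _ in range(n)]
--     cars = [[-1] * n for _ in range(n)]
--     for start in range(n):
--         dp[start][n - 1] = 0
--
--     def dist(i, j):
--         x1, y1 = accidents[i]
--         x2, y2 = accidents[j]
--         return abs(x1 - x2) + abs(y1 - y2)
--
--     def solve(start, last):
--         if last == n - 1:
--             return 0
--         if dp[start][last] != -1:
--             return dp[start][last]
--         from_start = dist(start, last + 1) + solve(last, last + 1)
--         from_j = dist(last, last + 1) + solve(start, last + 1)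
--         if from_start < from_j:
--             dp[start][last] = from_start
--             cars[start][last] = start
--         else:
--             dp[start][last] = from_j
--             cars[start][last] = last
--         return dp[start][last]
--
--     for last in range(n - 1):
--         for start in range(last):
--             solve(start, last)
--     return dp, cars
-- ===== Notes on version B (the rewrite author's own statement) =====
-- stated objective: alternative
-- what changed: Replaces A's bottom-up iterative table fill (columns filled right-to-left by nested loops) with top-down memoized recursion: a recursive solve(start,last) computes each cell on demand from the recurrence, memoizing into dp/cars, driven so the same upper-triangle cells get populated.
import Mathlib
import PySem

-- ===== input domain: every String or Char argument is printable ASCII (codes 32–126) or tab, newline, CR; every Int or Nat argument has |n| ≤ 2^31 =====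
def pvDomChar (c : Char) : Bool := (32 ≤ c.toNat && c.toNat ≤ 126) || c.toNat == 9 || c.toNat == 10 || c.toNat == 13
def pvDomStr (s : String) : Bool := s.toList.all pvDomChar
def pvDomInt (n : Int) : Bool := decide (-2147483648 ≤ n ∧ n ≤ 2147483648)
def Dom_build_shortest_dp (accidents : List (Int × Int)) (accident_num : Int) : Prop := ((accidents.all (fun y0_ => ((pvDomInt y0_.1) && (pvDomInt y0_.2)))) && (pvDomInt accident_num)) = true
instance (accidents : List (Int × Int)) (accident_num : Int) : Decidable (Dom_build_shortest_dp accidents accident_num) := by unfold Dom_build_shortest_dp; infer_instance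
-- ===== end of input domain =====

-- B replaces A's bottom-up iterative table fill by top-down memoized recursion:
-- a recursive solve computes each cell on demand from the recurrence, memoizing into
-- dp/cars; the same cells end up populated. Same asymptotic cost.

-- ===== PORT A =====
def get_dist (i j : Int) (accidents : List (Int × Int)) : Int :=
  let p := PySem.List.pyGetD accidents i ((0 : Int), (0 : Int))
  let q := PySem.List.pyGetD accidents j ((0 : Int), (0 : Int))
  |p.1 - q.1| + |p.2 - q.2|

-- dp[i][j] (read) and dp[i][j] = v (write); inside Pre_ all indices are in range
def pvGet2 (m : List (List Int)) (i j : Int) : Int :=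
  PySem.List.pyGetD (PySem.List.pyGetD m i []) j (-1)

def pvSet2 (m : List (List Int)) (i j : Int) (v : Int) : List (List Int) :=
  PySem.List.pySetD m i (PySem.List.pySetD (PySem.List.pyGetD m i []) j v)

-- loop body of 'for start in range(len(dp)): dp[start][-1] = 0'
def baseStep : List (List Int) → Int → List (List Int) :=
  fun dp start =>
    PySem.List.pySetD dp start (PySem.List.pySetD (PySem.List.pyGetD dp start []) (-1) 0)

-- loop body of the inner 'for start in range(last): …'
def innerStep (accidents : List (Int × Int)) (last : Int) :
    List (List Int) × List (List Int) → Int → List (List Int) × List (List Int) :=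
  fun st start =>
    let from_start := get_dist start (last + 1) accidents + pvGet2 st.1 last (last + 1)
    let from_j := get_dist last (last + 1) accidents + pvGet2 st.1 start (last + 1)
    if from_start < from_j then
      (pvSet2 st.1 start last from_start, pvSet2 st.2 start last start)
    else
      (pvSet2 st.1 start last from_j, pvSet2 st.2 start last last)

-- loop body of the outer 'for last in range(len(dp[0]) - 2, -1, -1): …'
def outerStep (accidents : List (Int × Int)) :
    List (List Int) × List (List Int) → Int → List (List Int) × List (List Int) :=
  fun st last => (PySem.List.pyRange 0 last 1).foldl (innerStep accidents last) st

def build_shortest_dp (accidents : List (Int × Int)) (accident_num : Int) :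
    List (List Int) × List (List Int) :=
  let dp0 : List (List Int) :=
    (PySem.List.pyRange 0 accident_num 1).map (fun _ => List.replicate accident_num.toNat (-1))
  let cars0 : List (List Int) :=
    (PySem.List.pyRange 0 accident_num 1).map (fun _ => List.replicate accident_num.toNat (-1))
  let dp1 := (PySem.List.pyRange 0 (dp0.length : Int) 1).foldl baseStep dp0
  (PySem.List.pyRange (((PySem.List.pyGetD dp1 0 []).length : Int) - 2) (-1) (-1)).foldl
    (outerStep accidents) (dp1, cars0)

-- ===== PORT B =====
-- Source B's nested helper 'dist'
def distB (accidents : List (Int × Int)) (i j : Int) : Int :=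
  let p := PySem.List.pyGetD accidents i ((0 : Int), (0 : Int))
  let q := PySem.List.pyGetD accidents j ((0 : Int), (0 : Int))
  |p.1 - q.1| + |p.2 - q.2|

-- Source B's recursive 'solve(start, last)': returns the value and the updated (dp, cars).
-- The fuel argument only makes the recursion total; on admitted inputs it never runs out.
def solveB (acc : List (Int × Int)) (n : Int) :
    Nat → List (List Int) × List (List Int) → Int → Int →
      Int × (List (List Int) × List (List Int))
  | 0, st, _, _ => (0, st)
  | f + 1, st, start, last =>
    if last = n - 1 then (0, st)
    else if pvGet2 st.1 start last ≠ -1 then (pvGet2 st.1 start last, st)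
    else
      let r1 := solveB acc n f st last (last + 1)
      let from_start := distB acc start (last + 1) + r1.1
      let r2 := solveB acc n f r1.2 start (last + 1)
      let from_j := distB acc last (last + 1) + r2.1
      if from_start < from_j then
        (from_start, (pvSet2 r2.2.1 start last from_start, pvSet2 r2.2.2 start last start))
      else
        (from_j, (pvSet2 r2.2.1 start last from_j, pvSet2 r2.2.2 start last last))

def build_shortest_dp_alt (accidents : List (Int × Int)) (accident_num : Int) :
    List (List Int) × List (List Int) :=
  let n := accident_num
  let dp0 : List (List Int) :=
    (PySem.List.pyRange 0 n 1).map (fun _ => List.replicate n.toNat (-1))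
  let cars0 : List (List Int) :=
    (PySem.List.pyRange 0 n 1).map (fun _ => List.replicate n.toNat (-1))
  let dp1 := (PySem.List.pyRange 0 n 1).foldl (fun dp start => pvSet2 dp start (n - 1) 0) dp0
  (PySem.List.pyRange 0 (n - 1) 1).foldl
    (fun st last =>
      (PySem.List.pyRange 0 last 1).foldl
        (fun st start => (solveB accidents n n.toNat st start last).2) st)
    (dp1, cars0)

-- ===== PRECONDITION & SPEC =====
-- Pre_ is exactly the set of inputs on which Python A returns normally: A raises IndexError
-- when accident_num ≤ 0 (it reads dp[0] of an empty table) and, for accident_num ≥ 3, when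
-- accidents has fewer than accident_num entries (get_dist indexes accidents up to accident_num-1;
-- for accident_num ≤ 2 the inner loop body never runs and accidents is never indexed).
def Pre_build_shortest_dp (accidents : List (Int × Int)) (accident_num : Int) : Prop :=
  1 ≤ accident_num ∧ (3 ≤ accident_num → accident_num ≤ (accidents.length : Int))
instance (accidents : List (Int × Int)) (accident_num : Int) :
    Decidable (Pre_build_shortest_dp accidents accident_num) := by
  unfold Pre_build_shortest_dp; infer_instance

def pvWitness_build_shortest_dp : (List (Int × Int)) × Int := ([(0, 0), (1, 2), (3, 4)], 3)

def Spec_build_shortest_dp (accidents : List (Int × Int)) (accident_num : Int)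
    (out : List (List Int) × List (List Int)) : Prop :=
  out = build_shortest_dp_alt accidents accident_num
instance (accidents : List (Int × Int)) (accident_num : Int)
    (out : List (List Int) × List (List Int)) :
    Decidable (Spec_build_shortest_dp accidents accident_num out) := by
  unfold Spec_build_shortest_dp; infer_instance

-- ===== CLAIM (what is proved, stated in full; the proofs are below) =====
def Claim_equal_build_shortest_dp : Prop := ∀ (accidents : List (Int × Int)) (accident_num : Int), Dom_build_shortest_dp accidents accident_num → Pre_build_shortest_dp accidents accident_num → Spec_build_shortest_dp accidents accident_num (build_shortest_dp accidents accident_num)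

-- ===== LEMMAS AND PROOFS =====

-- Cell (r, c) of the finished dp table (first component) and cars table (second):
-- column n-1 is the base (dp 0, cars -1); a cell with r < c < n-1 is filled by the recurrence;
-- every other cell keeps its initial -1.
def cellD (acc : List (Int × Int)) (n : Nat) (r c : Nat) : Int × Int :=
  if c + 1 = n then (0, -1)
  else if _h : c + 1 < n then
    (if r < c then
      let fs := get_dist (r : Int) ((c : Int) + 1) acc + (cellD acc n c (c + 1)).1
      let fj := get_dist (c : Int) ((c : Int) + 1) acc + (cellD acc n r (c + 1)).1
      if fs < fj then (fs, (r : Int)) else (fj, (c : Int))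
    else (-1, -1))
  else (-1, -1)
termination_by n - c

lemma cellD_base (acc : List (Int × Int)) (n : Nat) (r : Nat) (hn : 1 ≤ n) :
    cellD acc n r (n - 1) = (0, -1) := by
  rw [cellD]
  rw [if_pos (by omega)]

lemma cellD_fill (acc : List (Int × Int)) (n : Nat) (r c : Nat) (h1 : c + 1 < n) (h2 : r < c) :
    cellD acc n r c =
      (if get_dist (r : Int) (((c + 1 : Nat)) : Int) acc + (cellD acc n c (c + 1)).1
          < get_dist (c : Int) (((c + 1 : Nat)) : Int) acc + (cellD acc n r (c + 1)).1
       then (get_dist (r : Int) (((c + 1 : Nat)) : Int) acc + (cellD acc n c (c + 1)).1, (r : Int))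
       else (get_dist (c : Int) (((c + 1 : Nat)) : Int) acc + (cellD acc n r (c + 1)).1, (c : Int))) := by
  rw [cellD]
  rw [if_neg (by omega), dif_pos h1, if_pos h2]
  push_cast
  rfl

lemma cellD_skip (acc : List (Int × Int)) (n : Nat) (r c : Nat) (h1 : c + 1 < n) (h2 : ¬ r < c) :
    cellD acc n r c = (-1, -1) := by
  rw [cellD]
  rw [if_neg (by omega), dif_pos h1, if_neg h2]

-- n×n matrix as a list of rows given by a function
def matf (n : Nat) (f : Nat → Nat → Int) : List (List Int) :=
  (List.range n).map (fun r => (List.range n).map (f r))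

lemma matf_congr {n : Nat} {f g : Nat → Nat → Int}
    (h : ∀ r < n, ∀ c < n, f r c = g r c) : matf n f = matf n g := by
  unfold matf
  refine List.map_congr_left (fun r hr => ?_)
  refine List.map_congr_left (fun c hc => ?_)
  exact h r (List.mem_range.mp hr) c (List.mem_range.mp hc)

lemma map_range_set {α : Type} (g : Nat → α) (n j : Nat) (v : α) (_hj : j < n) :
    ((List.range n).map g).set j v = (List.range n).map (fun c => if c = j then v else g c) := by
  apply List.ext_getElem <;> simp
  intro k hk
  rw [List.getElem_set]
  by_cases h : j = k
  · simp [h]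
  · simp [h]; intro h'; omega

lemma pyGetD_map_range {α : Type} (g : Nat → α) (n k : Nat) (d : α) (hk : k < n) :
    PySem.List.pyGetD ((List.range n).map g) (k : Int) d = g k := by
  simp [PySem.List.pyGetD_natCast, List.getD, hk]

lemma pyGetD_matf (n : Nat) (f : Nat → Nat → Int) (i : Nat) (hi : i < n) :
    PySem.List.pyGetD (matf n f) (i : Int) [] = (List.range n).map (f i) := by
  unfold matf
  exact pyGetD_map_range _ n i [] hi

lemma pyGetD_matf_zero (n : Nat) (f : Nat → Nat → Int) (hn : 0 < n) :
    PySem.List.pyGetD (matf n f) (0 : Int) [] = (List.range n).map (f 0) := by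
  have h : ((0 : Nat) : Int) = (0 : Int) := by norm_num
  rw [← h]
  exact pyGetD_matf n f 0 hn

lemma pvGet2_matf (n : Nat) (f : Nat → Nat → Int) (i j : Nat) (hi : i < n) (hj : j < n) :
    pvGet2 (matf n f) (i : Int) (j : Int) = f i j := by
  rw [pvGet2, pyGetD_matf n f i hi]
  exact pyGetD_map_range _ n j (-1) hj

lemma pvSet2_matf (n : Nat) (f : Nat → Nat → Int) (i j : Nat) (hi : i < n) (hj : j < n) (v : Int) :
    pvSet2 (matf n f) (i : Int) (j : Int) v
      = matf n (fun r c => if r = i ∧ c = j then v else f r c) := by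
  rw [pvSet2, pyGetD_matf n f i hi]
  rw [PySem.List.pySetD_natCast, PySem.List.pySetD_natCast]
  rw [map_range_set (f i) n j v hj]
  unfold matf
  rw [map_range_set _ n i _ hi]
  refine List.map_congr_left (fun r _ => ?_)
  by_cases h : r = i
  · subst h
    rw [if_pos rfl]
    refine List.map_congr_left (fun c _ => ?_)
    by_cases hc : c = j <;> simp [hc]
  · simp [h]

-- xs[-1] = v for a nonempty list sets the last element
lemma pySetD_neg_one {α : Type} (xs : List α) (v : α) (h : 1 ≤ xs.length) :
    PySem.List.pySetD xs (-1) v = xs.set (xs.length - 1) v := by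
  have h2 : -((xs.length : Int)) ≤ (-1 : Int) := by omega
  simp [PySem.List.pySetD, PySem.List.pySet?, PySem.List.pyIdx?, h2]

-- ===== A-side =====

lemma a_init_aux (N : Nat) (hN : 1 ≤ N) :
    ∀ s : Nat, s ≤ N →
      (PySem.List.pyRange 0 (s : Int) 1).foldl baseStep (matf N (fun _ _ => (-1 : Int)))
        = matf N (fun r c => if r < s ∧ c = N - 1 then 0 else -1) := by
  intro s
  induction s with
  | zero =>
    intro _
    rw [PySem.List.pyRange_one_eq_nil (by omega)]
    rw [List.foldl_nil]
    exact matf_congr (fun r _ c _ => by simp)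
  | succ s ih =>
    intro hs
    rw [show (((s + 1 : Nat)) : Int) = ((s : Int) + 1) by push_cast; ring]
    rw [PySem.List.pyRange_one_succ_right (by omega)]
    rw [List.foldl_append, ih (by omega), List.foldl_cons, List.foldl_nil]
    have hsN : s < N := by omega
    simp only [baseStep]
    rw [pyGetD_matf N _ s hsN]
    rw [pySetD_neg_one _ _ (by simpa using hN)]
    rw [show ((List.range N).map ((fun r c => if r < s ∧ c = N - 1 then (0 : Int) else -1) s)).length = N by simp]
    rw [map_range_set _ N (N - 1) 0 (by omega)]
    rw [PySem.List.pySetD_natCast]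
    unfold matf
    rw [map_range_set _ N s _ hsN]
    refine List.map_congr_left (fun r _ => ?_)
    by_cases hr : r = s
    · rw [if_pos hr]
      refine List.map_congr_left (fun c _ => ?_)
      show (if c = N - 1 then (0 : Int) else if s < s ∧ c = N - 1 then 0 else -1)
          = (if r < s + 1 ∧ c = N - 1 then 0 else -1)
      split_ifs <;> omega
    · rw [if_neg hr]
      refine List.map_congr_left (fun c _ => ?_)
      show (if r < s ∧ c = N - 1 then (0 : Int) else -1)
          = (if r < s + 1 ∧ c = N - 1 then 0 else -1)
      split_ifs <;> omega

def Dfun (acc : List (Int × Int)) (N L : Nat) : Nat → Nat → Int :=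
  fun r c => if L ≤ c then (cellD acc N r c).1 else -1
def Cfun (acc : List (Int × Int)) (N L : Nat) : Nat → Nat → Int :=
  fun r c => if L ≤ c then (cellD acc N r c).2 else -1

-- state of A's tables after the inner loop has handled start = 0 … s-1 of column L
def Dfun' (acc : List (Int × Int)) (N L s : Nat) : Nat → Nat → Int :=
  fun r c => if c = L ∧ r < s then (cellD acc N r c).1 else Dfun acc N (L + 1) r c
def Cfun' (acc : List (Int × Int)) (N L s : Nat) : Nat → Nat → Int :=
  fun r c => if c = L ∧ r < s then (cellD acc N r c).2 else Cfun acc N (L + 1) r c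

lemma a_inner (acc : List (Int × Int)) (N L : Nat) (hL : L + 1 ≤ N - 1) (hN : 1 ≤ N) :
    ∀ s : Nat, s ≤ L →
      (PySem.List.pyRange 0 (s : Int) 1).foldl (innerStep acc (L : Int))
        (matf N (Dfun acc N (L + 1)), matf N (Cfun acc N (L + 1)))
      = (matf N (Dfun' acc N L s), matf N (Cfun' acc N L s)) := by
  have hL1 : L + 1 < N := by omega
  have hLN : L < N := by omega
  intro s
  induction s with
  | zero =>
    intro _
    rw [PySem.List.pyRange_one_eq_nil (by omega)]
    rw [List.foldl_nil]
    refine Prod.ext ?_ ?_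
    · exact matf_congr (fun r _ c _ => by simp [Dfun'])
    · exact matf_congr (fun r _ c _ => by simp [Cfun'])
  | succ s ih =>
    intro hs
    have hsL : s < L := by omega
    have hsN : s < N := by omega
    rw [show (((s + 1 : Nat)) : Int) = ((s : Int) + 1) by push_cast; ring]
    rw [PySem.List.pyRange_one_succ_right (by omega)]
    rw [List.foldl_append, ih (by omega), List.foldl_cons, List.foldl_nil]
    simp only [innerStep]
    rw [show ((L : Int) + 1) = (((L + 1 : Nat)) : Int) by push_cast; ring]
    rw [pvGet2_matf N _ L (L + 1) hLN hL1, pvGet2_matf N _ s (L + 1) hsN hL1]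
    have e1 : Dfun' acc N L s L (L + 1) = (cellD acc N L (L + 1)).1 := by
      show (if L + 1 = L ∧ L < s then (cellD acc N L (L + 1)).1
            else if L + 1 ≤ L + 1 then (cellD acc N L (L + 1)).1 else -1)
          = (cellD acc N L (L + 1)).1
      rw [if_neg (by omega), if_pos (by omega)]
    have e2 : Dfun' acc N L s s (L + 1) = (cellD acc N s (L + 1)).1 := by
      show (if L + 1 = L ∧ s < s then (cellD acc N s (L + 1)).1
            else if L + 1 ≤ L + 1 then (cellD acc N s (L + 1)).1 else -1)
          = (cellD acc N s (L + 1)).1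
      rw [if_neg (by omega), if_pos (by omega)]
    rw [e1, e2]
    have hcell := cellD_fill acc N s L hL1 hsL
    split_ifs with hlt
    · rw [pvSet2_matf N _ s L hsN hLN, pvSet2_matf N _ s L hsN hLN]
      refine Prod.ext ?_ ?_
      · refine matf_congr (fun r _ c _ => ?_)
        show (if r = s ∧ c = L then get_dist (s : Int) (((L + 1 : Nat)) : Int) acc + (cellD acc N L (L + 1)).1 else Dfun' acc N L s r c) = Dfun' acc N L (s + 1) r c
        by_cases h1 : r = s ∧ c = L
        · rw [if_pos h1]
          show get_dist (s : Int) (((L + 1 : Nat)) : Int) acc + (cellD acc N L (L + 1)).1 = (if c = L ∧ r < s + 1 then (cellD acc N r c).1 else Dfun acc N (L + 1) r c)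
          rw [if_pos ⟨h1.2, by omega⟩, h1.1, h1.2, hcell, if_pos hlt]
        · rw [if_neg h1]
          show (if c = L ∧ r < s then (cellD acc N r c).1 else Dfun acc N (L + 1) r c)
              = (if c = L ∧ r < s + 1 then (cellD acc N r c).1 else Dfun acc N (L + 1) r c)
          by_cases h2 : c = L ∧ r < s
          · rw [if_pos h2, if_pos ⟨h2.1, by omega⟩]
          · rw [if_neg h2, if_neg (by omega)]
      · refine matf_congr (fun r _ c _ => ?_)
        show (if r = s ∧ c = L then (s : Int) else Cfun' acc N L s r c) = Cfun' acc N L (s + 1) r c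
        by_cases h1 : r = s ∧ c = L
        · rw [if_pos h1]
          show (s : Int) = (if c = L ∧ r < s + 1 then (cellD acc N r c).2 else Cfun acc N (L + 1) r c)
          rw [if_pos ⟨h1.2, by omega⟩, h1.1, h1.2, hcell, if_pos hlt]
        · rw [if_neg h1]
          show (if c = L ∧ r < s then (cellD acc N r c).2 else Cfun acc N (L + 1) r c)
              = (if c = L ∧ r < s + 1 then (cellD acc N r c).2 else Cfun acc N (L + 1) r c)
          by_cases h2 : c = L ∧ r < s
          · rw [if_pos h2, if_pos ⟨h2.1, by omega⟩]
          · rw [if_neg h2, if_neg (by omega)]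
    · rw [pvSet2_matf N _ s L hsN hLN, pvSet2_matf N _ s L hsN hLN]
      refine Prod.ext ?_ ?_
      · refine matf_congr (fun r _ c _ => ?_)
        show (if r = s ∧ c = L then get_dist (L : Int) (((L + 1 : Nat)) : Int) acc + (cellD acc N s (L + 1)).1 else Dfun' acc N L s r c) = Dfun' acc N L (s + 1) r c
        by_cases h1 : r = s ∧ c = L
        · rw [if_pos h1]
          show get_dist (L : Int) (((L + 1 : Nat)) : Int) acc + (cellD acc N s (L + 1)).1 = (if c = L ∧ r < s + 1 then (cellD acc N r c).1 else Dfun acc N (L + 1) r c)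
          rw [if_pos ⟨h1.2, by omega⟩, h1.1, h1.2, hcell, if_neg hlt]
        · rw [if_neg h1]
          show (if c = L ∧ r < s then (cellD acc N r c).1 else Dfun acc N (L + 1) r c)
              = (if c = L ∧ r < s + 1 then (cellD acc N r c).1 else Dfun acc N (L + 1) r c)
          by_cases h2 : c = L ∧ r < s
          · rw [if_pos h2, if_pos ⟨h2.1, by omega⟩]
          · rw [if_neg h2, if_neg (by omega)]
      · refine matf_congr (fun r _ c _ => ?_)
        show (if r = s ∧ c = L then (L : Int) else Cfun' acc N L s r c) = Cfun' acc N L (s + 1) r c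
        by_cases h1 : r = s ∧ c = L
        · rw [if_pos h1]
          show (L : Int) = (if c = L ∧ r < s + 1 then (cellD acc N r c).2 else Cfun acc N (L + 1) r c)
          rw [if_pos ⟨h1.2, by omega⟩, h1.1, h1.2, hcell, if_neg hlt]
        · rw [if_neg h1]
          show (if c = L ∧ r < s then (cellD acc N r c).2 else Cfun acc N (L + 1) r c)
              = (if c = L ∧ r < s + 1 then (cellD acc N r c).2 else Cfun acc N (L + 1) r c)
          by_cases h2 : c = L ∧ r < s
          · rw [if_pos h2, if_pos ⟨h2.1, by omega⟩]
          · rw [if_neg h2, if_neg (by omega)]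

lemma a_outer_step (acc : List (Int × Int)) (N L : Nat) (hL : L + 1 ≤ N - 1) (hN : 1 ≤ N) :
    outerStep acc (matf N (Dfun acc N (L + 1)), matf N (Cfun acc N (L + 1))) (L : Int)
      = (matf N (Dfun acc N L), matf N (Cfun acc N L)) := by
  have hL1 : L + 1 < N := by omega
  simp only [outerStep]
  rw [a_inner acc N L hL hN L (le_refl L)]
  refine Prod.ext ?_ ?_
  · refine matf_congr (fun r _ c _ => ?_)
    show (if c = L ∧ r < L then (cellD acc N r c).1 else if L + 1 ≤ c then (cellD acc N r c).1 else -1)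
        = (if L ≤ c then (cellD acc N r c).1 else -1)
    by_cases h1 : c = L ∧ r < L
    · rw [if_pos h1, if_pos (show L ≤ c by omega)]
    · rw [if_neg h1]
      by_cases h2 : L + 1 ≤ c
      · rw [if_pos h2, if_pos (show L ≤ c by omega)]
      · rw [if_neg h2]
        by_cases h3 : L ≤ c
        · rw [if_pos h3]
          have hc : c = L := by omega
          rw [hc, cellD_skip acc N r L hL1 (by omega)]
        · rw [if_neg h3]
  · refine matf_congr (fun r _ c _ => ?_)
    show (if c = L ∧ r < L then (cellD acc N r c).2 else if L + 1 ≤ c then (cellD acc N r c).2 else -1)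
        = (if L ≤ c then (cellD acc N r c).2 else -1)
    by_cases h1 : c = L ∧ r < L
    · rw [if_pos h1, if_pos (show L ≤ c by omega)]
    · rw [if_neg h1]
      by_cases h2 : L + 1 ≤ c
      · rw [if_pos h2, if_pos (show L ≤ c by omega)]
      · rw [if_neg h2]
        by_cases h3 : L ≤ c
        · rw [if_pos h3]
          have hc : c = L := by omega
          rw [hc, cellD_skip acc N r L hL1 (by omega)]
        · rw [if_neg h3]

lemma a_outer (acc : List (Int × Int)) (N : Nat) (hN : 1 ≤ N) :
    ∀ L : Nat, L ≤ N - 1 →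
      (PySem.List.pyRange ((L : Int) - 1) (-1) (-1)).foldl (outerStep acc)
        (matf N (Dfun acc N L), matf N (Cfun acc N L))
      = (matf N (Dfun acc N 0), matf N (Cfun acc N 0)) := by
  intro L
  induction L with
  | zero =>
    intro _
    rw [PySem.List.pyRange_neg_one_eq_nil (by omega)]
    rw [List.foldl_nil]
  | succ L ih =>
    intro hL
    rw [show (((L + 1 : Nat)) : Int) - 1 = (L : Int) by push_cast; ring]
    rw [PySem.List.pyRange_neg_one_cons (by omega)]
    rw [List.foldl_cons, a_outer_step acc N L hL hN]
    exact ih (by omega)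

lemma a_eq (acc : List (Int × Int)) (N : Nat) (hN : 1 ≤ N) :
    build_shortest_dp acc (N : Int)
      = (matf N (fun r c => (cellD acc N r c).1), matf N (fun r c => (cellD acc N r c).2)) := by
  simp only [build_shortest_dp]
  have h0 : (PySem.List.pyRange 0 ((N : Int)) 1).map
      (fun _ => List.replicate ((N : Int)).toNat (-1 : Int)) = matf N (fun _ _ => -1) := by
    rw [PySem.List.pyRange_zero_nat, List.map_map]
    unfold matf
    refine List.map_congr_left (fun r _ => ?_)
    simp [List.map_const']
  rw [h0]
  have hlen : (matf N (fun _ _ => (-1 : Int))).length = N := by simp [matf]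
  rw [hlen]
  rw [a_init_aux N hN N (le_refl N)]
  have hD : matf N (fun r c => if r < N ∧ c = N - 1 then (0 : Int) else -1)
      = matf N (Dfun acc N (N - 1)) := by
    refine matf_congr (fun r hr c hc => ?_)
    show (if r < N ∧ c = N - 1 then (0 : Int) else -1)
        = (if N - 1 ≤ c then (cellD acc N r c).1 else -1)
    by_cases h : c = N - 1
    · rw [if_pos ⟨hr, h⟩, if_pos (by omega), h, cellD_base acc N r hN]
    · rw [if_neg (by omega), if_neg (by omega)]
  have hC : matf N (fun _ _ => (-1 : Int)) = matf N (Cfun acc N (N - 1)) := by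
    refine matf_congr (fun r _ c hc => ?_)
    show (-1 : Int) = (if N - 1 ≤ c then (cellD acc N r c).2 else -1)
    by_cases h : N - 1 ≤ c
    · have hc' : c = N - 1 := by omega
      rw [if_pos h, hc', cellD_base acc N r hN]
    · rw [if_neg h]
  rw [hD, hC]
  rw [pyGetD_matf_zero N _ (by omega)]
  rw [show (((List.range N).map (Dfun acc N (N - 1) 0)).length : Int) - 2
        = (((N - 1 : Nat)) : Int) - 1 from by simp; omega]
  rw [a_outer acc N hN (N - 1) (le_refl _)]
  refine Prod.ext ?_ ?_
  · exact matf_congr (fun r _ c _ => by simp [Dfun])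
  · exact matf_congr (fun r _ c _ => by simp [Cfun])

-- ===== B-side =====

lemma distB_eq (acc : List (Int × Int)) (i j : Int) : distB acc i j = get_dist i j acc := rfl

lemma get_dist_nonneg (i j : Int) (acc : List (Int × Int)) : 0 ≤ get_dist i j acc :=
  add_nonneg (abs_nonneg _) (abs_nonneg _)

lemma cellD_fst_nonneg (acc : List (Int × Int)) (N : Nat) :
    ∀ k c r : Nat, N - c = k → r < c → c < N → 0 ≤ (cellD acc N r c).1 := by
  intro k
  induction k with
  | zero => intro c r hk _ hc; omega
  | succ k ih =>
    intro c r hk hrc hc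
    by_cases h1 : c + 1 = N
    · rw [cellD, if_pos h1]
    · have h1' : c + 1 < N := by omega
      rw [cellD_fill acc N r c h1' hrc]
      split_ifs
      · exact add_nonneg (get_dist_nonneg _ _ _) (ih (c + 1) c (by omega) (by omega) h1')
      · exact add_nonneg (get_dist_nonneg _ _ _) (ih (c + 1) r (by omega) (by omega) h1')

-- memo invariant: every cell of the tables is either -1 (untouched together with its
-- cars entry) or already holds its final cellD value
def PInv (acc : List (Int × Int)) (N : Nat) (D C : Nat → Nat → Int) : Prop :=
  ∀ r, r < N → ∀ c, c < N →
    (D r c = (cellD acc N r c).1 ∧ C r c = (cellD acc N r c).2) ∨ (D r c = -1 ∧ C r c = -1)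

lemma solve_ok (acc : List (Int × Int)) (N : Nat) (hN : 1 ≤ N) :
    ∀ (f : Nat) (D C : Nat → Nat → Int) (s l : Nat),
      s < l → l ≤ N - 1 → N - 1 - l ≤ f → PInv acc N D C →
      ∃ D' C',
        solveB acc (N : Int) f (matf N D, matf N C) (s : Int) (l : Int)
          = ((cellD acc N s l).1, (matf N D', matf N C')) ∧
        PInv acc N D' C' ∧
        (∀ r c : Nat, D r c ≠ -1 → D' r c = D r c ∧ C' r c = C r c) ∧
        (l < N - 1 → D' s l ≠ -1) := by
  intro f
  induction f with
  | zero =>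
    intro D C s l hs hl hf hP
    have hl' : l = N - 1 := by omega
    refine ⟨D, C, ?_, hP, fun r c _ => ⟨rfl, rfl⟩, by omega⟩
    subst hl'
    rw [cellD_base acc N s hN]
    rfl
  | succ f ih =>
    intro D C s l hs hl hf hP
    by_cases hle : l = N - 1
    · refine ⟨D, C, ?_, hP, fun r c _ => ⟨rfl, rfl⟩, by omega⟩
      rw [solveB, if_pos (by omega), hle, cellD_base acc N s hN]
    · have hlN1 : l < N - 1 := by omega
      have hsN : s < N := by omega
      have hlN : l < N := by omega
      have hget : pvGet2 (matf N D, matf N C).1 (s : Int) (l : Int) = D s l :=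
        pvGet2_matf N D s l hsN hlN
      by_cases hmem : D s l ≠ -1
      · have hcell : D s l = (cellD acc N s l).1 ∧ C s l = (cellD acc N s l).2 := by
          rcases hP s hsN l hlN with h | h
          · exact h
          · exact absurd h.1 hmem
        refine ⟨D, C, ?_, hP, fun r c _ => ⟨rfl, rfl⟩, fun _ => hmem⟩
        rw [solveB, if_neg (by omega), hget, if_pos hmem, hcell.1]
      · have hD0 : D s l = -1 := by
          by_contra h; exact hmem h
        obtain ⟨D1, C1, h1, hP1, hm1, _⟩ :=
          ih D C l (l + 1) (by omega) (by omega) (by omega) hP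
        obtain ⟨D2, C2, h2, hP2, hm2, _⟩ :=
          ih D1 C1 s (l + 1) (by omega) (by omega) (by omega) hP1
        have hcast : ((l : Int) + 1) = (((l + 1 : Nat)) : Int) := by push_cast; ring
        have hfill := cellD_fill acc N s l (by omega) hs
        -- unfold one step of solveB and rewrite the recursive calls
        rw [solveB, if_neg (by omega), hget, if_neg (by simpa using hD0)]
        simp only [hcast, h1, h2, distB_eq]
        -- after the rewrites the comparison matches cellD_fill's
        by_cases hlt : get_dist (s : Int) (((l + 1 : Nat)) : Int) acc + (cellD acc N l (l + 1)).1
            < get_dist (l : Int) (((l + 1 : Nat)) : Int) acc + (cellD acc N s (l + 1)).1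
        · refine ⟨fun r c => if r = s ∧ c = l then (cellD acc N s l).1 else D2 r c,
                 fun r c => if r = s ∧ c = l then (cellD acc N s l).2 else C2 r c, ?_, ?_, ?_, ?_⟩
          · rw [if_pos hlt]
            rw [pvSet2_matf N D2 s l hsN hlN, pvSet2_matf N C2 s l hsN hlN]
            refine Prod.ext ?_ (Prod.ext ?_ ?_) <;> simp only
            · rw [hfill, if_pos hlt]
            · refine congrArg (matf N) (funext fun r => funext fun c => ?_)
              by_cases h : r = s ∧ c = l
              · rw [if_pos h, if_pos h, hfill, if_pos hlt]
              · rw [if_neg h, if_neg h]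
            · refine congrArg (matf N) (funext fun r => funext fun c => ?_)
              by_cases h : r = s ∧ c = l
              · rw [if_pos h, if_pos h, hfill, if_pos hlt]
              · rw [if_neg h, if_neg h]
          · intro r hr c hc
            simp only
            by_cases h : r = s ∧ c = l
            · left
              refine ⟨?_, ?_⟩ <;> rw [if_pos h, h.1, h.2]
            · rw [if_neg h, if_neg h]; exact hP2 r hr c hc
          · intro r c hD
            simp only
            have h : ¬ (r = s ∧ c = l) := by
              rintro ⟨rfl, rfl⟩; exact hD hD0
            rw [if_neg h, if_neg h]
            obtain ⟨e1, e2⟩ := hm1 r c hD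
            obtain ⟨e3, e4⟩ := hm2 r c (by rw [e1]; exact hD)
            exact ⟨by rw [e3, e1], by rw [e4, e2]⟩
          · intro _
            show (if s = s ∧ l = l then (cellD acc N s l).1 else D2 s l) ≠ -1
            rw [if_pos ⟨rfl, rfl⟩]
            have := cellD_fst_nonneg acc N (N - l) l s rfl hs hlN
            omega
        · refine ⟨fun r c => if r = s ∧ c = l then (cellD acc N s l).1 else D2 r c,
                 fun r c => if r = s ∧ c = l then (cellD acc N s l).2 else C2 r c, ?_, ?_, ?_, ?_⟩
          · rw [if_neg hlt]
            rw [pvSet2_matf N D2 s l hsN hlN, pvSet2_matf N C2 s l hsN hlN]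
            refine Prod.ext ?_ (Prod.ext ?_ ?_) <;> simp only
            · rw [hfill, if_neg hlt]
            · refine congrArg (matf N) (funext fun r => funext fun c => ?_)
              by_cases h : r = s ∧ c = l
              · rw [if_pos h, if_pos h, hfill, if_neg hlt]
              · rw [if_neg h, if_neg h]
            · refine congrArg (matf N) (funext fun r => funext fun c => ?_)
              by_cases h : r = s ∧ c = l
              · rw [if_pos h, if_pos h, hfill, if_neg hlt]
              · rw [if_neg h, if_neg h]
          · intro r hr c hc
            simp only
            by_cases h : r = s ∧ c = l
            · left
              refine ⟨?_, ?_⟩ <;> rw [if_pos h, h.1, h.2]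
            · rw [if_neg h, if_neg h]; exact hP2 r hr c hc
          · intro r c hD
            simp only
            have h : ¬ (r = s ∧ c = l) := by
              rintro ⟨rfl, rfl⟩; exact hD hD0
            rw [if_neg h, if_neg h]
            obtain ⟨e1, e2⟩ := hm1 r c hD
            obtain ⟨e3, e4⟩ := hm2 r c (by rw [e1]; exact hD)
            exact ⟨by rw [e3, e1], by rw [e4, e2]⟩
          · intro _
            show (if s = s ∧ l = l then (cellD acc N s l).1 else D2 s l) ≠ -1
            rw [if_pos ⟨rfl, rfl⟩]
            have := cellD_fst_nonneg acc N (N - l) l s rfl hs hlN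
            omega

lemma b_inner (acc : List (Int × Int)) (N : Nat) (hN : 1 ≤ N) (L : Nat) (hL : L < N - 1) :
    ∀ s : Nat, s ≤ L → ∀ D C : Nat → Nat → Int, PInv acc N D C →
      ∃ D' C',
        (PySem.List.pyRange 0 (s : Int) 1).foldl
          (fun st start => (solveB acc (N : Int) N st start (L : Int)).2) (matf N D, matf N C)
        = (matf N D', matf N C') ∧ PInv acc N D' C' ∧
        (∀ r c : Nat, D r c ≠ -1 → D' r c = D r c ∧ C' r c = C r c) ∧
        (∀ r, r < s → D' r L ≠ -1) := by
  intro s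
  induction s with
  | zero =>
    intro _ D C hP
    refine ⟨D, C, ?_, hP, fun r c _ => ⟨rfl, rfl⟩, fun r hr => absurd hr (by omega)⟩
    rw [PySem.List.pyRange_one_eq_nil (by omega), List.foldl_nil]
  | succ s ih =>
    intro hs D C hP
    obtain ⟨D1, C1, h1, hP1, hm1, hfill1⟩ := ih (by omega) D C hP
    obtain ⟨D2, C2, h2, hP2, hm2, hfill2⟩ :=
      solve_ok acc N hN N D1 C1 s L (by omega) (by omega) (by omega) hP1
    refine ⟨D2, C2, ?_, hP2, ?_, ?_⟩
    · rw [show (((s + 1 : Nat)) : Int) = ((s : Int) + 1) by push_cast; ring]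
      rw [PySem.List.pyRange_one_succ_right (by omega)]
      rw [List.foldl_append, h1, List.foldl_cons, List.foldl_nil, h2]
    · intro r c hD
      obtain ⟨e1, e2⟩ := hm1 r c hD
      obtain ⟨e3, e4⟩ := hm2 r c (by rw [e1]; exact hD)
      exact ⟨by rw [e3, e1], by rw [e4, e2]⟩
    · intro r hr
      by_cases h : r < s
      · have hne := hfill1 r h
        rw [(hm2 r L hne).1]
        exact hne
      · have : r = s := by omega
        subst this
        exact hfill2 hL

lemma b_outer (acc : List (Int × Int)) (N : Nat) (hN : 1 ≤ N) :
    ∀ M : Nat, M ≤ N - 1 → ∀ D C : Nat → Nat → Int, PInv acc N D C →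
      ∃ D' C',
        (PySem.List.pyRange 0 (M : Int) 1).foldl
          (fun st last =>
            (PySem.List.pyRange 0 last 1).foldl
              (fun st start => (solveB acc (N : Int) N st start last).2) st)
          (matf N D, matf N C)
        = (matf N D', matf N C') ∧ PInv acc N D' C' ∧
        (∀ r c : Nat, D r c ≠ -1 → D' r c = D r c ∧ C' r c = C r c) ∧
        (∀ c, c < M → ∀ r, r < c → D' r c ≠ -1) := by
  intro M
  induction M with
  | zero =>
    intro _ D C hP
    refine ⟨D, C, ?_, hP, fun r c _ => ⟨rfl, rfl⟩, fun c hc => absurd hc (by omega)⟩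
    rw [PySem.List.pyRange_one_eq_nil (by omega), List.foldl_nil]
  | succ M ih =>
    intro hM D C hP
    obtain ⟨D1, C1, h1, hP1, hm1, hfill1⟩ := ih (by omega) D C hP
    obtain ⟨D2, C2, h2, hP2, hm2, hfill2⟩ := b_inner acc N hN M (by omega) M (le_refl M) D1 C1 hP1
    refine ⟨D2, C2, ?_, hP2, ?_, ?_⟩
    · rw [show (((M + 1 : Nat)) : Int) = ((M : Int) + 1) by push_cast; ring]
      rw [PySem.List.pyRange_one_succ_right (by omega)]
      rw [List.foldl_append, h1, List.foldl_cons, List.foldl_nil, h2]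
    · intro r c hD
      obtain ⟨e1, e2⟩ := hm1 r c hD
      obtain ⟨e3, e4⟩ := hm2 r c (by rw [e1]; exact hD)
      exact ⟨by rw [e3, e1], by rw [e4, e2]⟩
    · intro c hc r hr
      by_cases h : c < M
      · have hne := hfill1 c h r hr
        rw [(hm2 r c hne).1]
        exact hne
      · have : c = M := by omega
        subst this
        exact hfill2 r hr

lemma b_init (N : Nat) (hN : 1 ≤ N) :
    ∀ s : Nat, s ≤ N →
      (PySem.List.pyRange 0 (s : Int) 1).foldl
        (fun dp start => pvSet2 dp start ((N : Int) - 1) 0)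
        (matf N (fun _ _ => (-1 : Int)))
      = matf N (fun r c => if r < s ∧ c = N - 1 then 0 else -1) := by
  intro s
  induction s with
  | zero =>
    intro _
    rw [PySem.List.pyRange_one_eq_nil (by omega), List.foldl_nil]
    exact matf_congr (fun r _ c _ => by simp)
  | succ s ih =>
    intro hs
    rw [show (((s + 1 : Nat)) : Int) = ((s : Int) + 1) by push_cast; ring]
    rw [PySem.List.pyRange_one_succ_right (by omega)]
    rw [List.foldl_append, ih (by omega), List.foldl_cons, List.foldl_nil]
    rw [show ((N : Int) - 1) = (((N - 1 : Nat)) : Int) by omega]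
    rw [pvSet2_matf N _ s (N - 1) (by omega) (by omega)]
    refine matf_congr (fun r _ c _ => ?_)
    split_ifs <;> omega

lemma b_eq (acc : List (Int × Int)) (N : Nat) (hN : 1 ≤ N) :
    build_shortest_dp_alt acc (N : Int)
      = (matf N (fun r c => (cellD acc N r c).1), matf N (fun r c => (cellD acc N r c).2)) := by
  simp only [build_shortest_dp_alt]
  have h0 : (PySem.List.pyRange 0 ((N : Int)) 1).map
      (fun _ => List.replicate ((N : Int)).toNat (-1 : Int)) = matf N (fun _ _ => -1) := by
    rw [PySem.List.pyRange_zero_nat, List.map_map]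
    unfold matf
    refine List.map_congr_left (fun r _ => ?_)
    simp [List.map_const']
  rw [h0, b_init N hN N (le_refl N)]
  have hP0 : PInv acc N (fun r c => if r < N ∧ c = N - 1 then 0 else -1) (fun _ _ => -1) := by
    intro r hr c hc
    by_cases h : c = N - 1
    · left
      subst h
      rw [cellD_base acc N r hN]
      constructor
      · show (if r < N ∧ N - 1 = N - 1 then (0 : Int) else -1) = ((0 : Int), (-1 : Int)).1
        rw [if_pos ⟨hr, rfl⟩]
      · rfl
    · right
      constructor
      · show (if r < N ∧ c = N - 1 then (0 : Int) else -1) = -1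
        rw [if_neg (by omega)]
      · rfl
  obtain ⟨D', C', hEq, hP', hm', hfill'⟩ :=
    b_outer acc N hN (N - 1) (le_refl _) (fun r c => if r < N ∧ c = N - 1 then 0 else -1)
      (fun _ _ => -1) hP0
  rw [show ((N : Int) - 1) = (((N - 1 : Nat)) : Int) by omega,
      show ((N : Int)).toNat = N from Int.toNat_natCast N]
  rw [hEq]
  have hfin : ∀ r, r < N → ∀ c, c < N →
      D' r c = (cellD acc N r c).1 ∧ C' r c = (cellD acc N r c).2 := by
    intro r hr c hc
    by_cases hb : c = N - 1
    · subst hb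
      obtain ⟨e1, e2⟩ := hm' r (N - 1) (by rw [if_pos ⟨hr, rfl⟩]; omega)
      rw [e1, e2, if_pos ⟨hr, rfl⟩, cellD_base acc N r hN]
      exact ⟨rfl, rfl⟩
    · by_cases hrc : r < c
      · have hne := hfill' c (by omega) r hrc
        rcases hP' r hr c hc with h | h
        · exact h
        · exact absurd h.1 hne
      · have hsk : cellD acc N r c = (-1, -1) := cellD_skip acc N r c (by omega) hrc
        rcases hP' r hr c hc with h | h
        · exact h
        · rw [hsk]
          exact h
  refine Prod.ext ?_ ?_
  · exact matf_congr (fun r hr c hc => (hfin r hr c hc).1)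
  · exact matf_congr (fun r hr c hc => (hfin r hr c hc).2)

-- ===== VERDICT (by name: the statement is the Claim_ definition above) =====
theorem build_shortest_dp_spec : Claim_equal_build_shortest_dp := by
  intro acc m _hDom hPre
  obtain ⟨h1, _⟩ := hPre
  have hm : m = ((m.toNat : Nat) : Int) := by omega
  have hN : 1 ≤ m.toNat := by omega
  unfold Spec_build_shortest_dp
  rw [hm, a_eq acc m.toNat hN, b_eq acc m.toNat hN]
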